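-- pv_equiv track=rewrite | github.com/RicardoZF/structure_prediction | Protenix/fasta.py | replace_and_track
-- ===== SOURCE A (Python) =====
-- replacements = {
--     '(HYP)': 'P',
--     '(SME)': 'M',
--     '(LYZ)': 'K'
-- }
--
-- def replace_and_track(input_seq):
--     result = []
--     positions = []
--     i = 0
--     while i < len(input_seq):
--         replaced = False
--         for tag, replacement in replacements.items():
--             if input_seq.startswith(tag, i):
--                 result.append(replacement)
--                 positions.append((tag.strip('()'), len(''.join(result))))
--                 i += len(tag)
--                 replaced = True
--                 break
--         if not replaced:
--             result.append(input_seq[i])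
--             i += 1
--     return ''.join(result), positions
-- ===== SOURCE B (Python) =====
-- replacements = {
--     '(HYP)': 'P',
--     '(SME)': 'M',
--     '(LYZ)': 'K'
-- }
--
-- def replace_and_track(input_seq):
--     # jump between tag occurrences with str.find instead of scanning char by char
--     out = []
--     positions = []
--     i = 0
--     total = 0
--     while True:
--         best = -1
--         best_tag = None
--         for tag in replacements:
--             j = input_seq.find(tag, i)
--             if j != -1 and (best == -1 or j < best):
--                 best = j
--                 best_tag = tag
--         if best == -1:
--             out.append(input_seq[i:])
--             break
--         out.append(input_seq[i:best])
--         out.append(replacements[best_tag])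
--         total += best - i + 1
--         positions.append((best_tag[1:-1], total))
--         i = best + len(best_tag)
--     return ''.join(out), positions
-- ===== Notes on version B (the rewrite author's own statement) =====
-- stated objective: faster
-- what changed: B jumps from tag occurrence to tag occurrence with str.find and copies whole untouched slices at once, keeping a running output-length counter, instead of A's per-character index/startswith loop that appends one character at a time.
import Mathlib
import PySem

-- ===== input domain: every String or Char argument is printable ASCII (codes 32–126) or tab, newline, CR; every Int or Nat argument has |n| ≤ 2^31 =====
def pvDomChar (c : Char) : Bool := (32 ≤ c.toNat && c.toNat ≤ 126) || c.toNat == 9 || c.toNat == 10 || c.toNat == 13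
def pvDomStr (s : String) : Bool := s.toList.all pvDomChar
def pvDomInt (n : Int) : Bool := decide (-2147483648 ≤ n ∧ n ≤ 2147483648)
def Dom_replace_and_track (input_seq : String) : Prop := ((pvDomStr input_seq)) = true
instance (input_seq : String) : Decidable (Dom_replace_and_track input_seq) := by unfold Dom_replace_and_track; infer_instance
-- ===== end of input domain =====

-- B replaces A's per-character index/startswith scan by a find-and-jump traversal; equivalence of return values is proved (no mutation involved).

-- ===== PORT A =====
def pvHyp : List Char := ['(', 'H', 'Y', 'P', ')']
def pvSme : List Char := ['(', 'S', 'M', 'E', ')']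
def pvLyz : List Char := ['(', 'L', 'Y', 'Z', ')']

-- A's while-loop over index i, transcribed as recursion on the suffix from i
-- (startswith(tag, i) = tag prefix of the suffix, input_seq[i] = its head);
-- positions record len(''.join(result)) after the append, i.e. (acc ++ [repl]).length.
def pvGoA : List Char → List Char → List (String × Int) → List Char × List (String × Int)
  | [], acc, pos => (acc, pos)
  | c :: rest, acc, pos =>
    if pvHyp.isPrefixOf (c :: rest) then
      pvGoA ((c :: rest).drop 5) (acc ++ ['P']) (pos ++ [("HYP", ((acc ++ ['P']).length : Int))])
    else if pvSme.isPrefixOf (c :: rest) then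
      pvGoA ((c :: rest).drop 5) (acc ++ ['M']) (pos ++ [("SME", ((acc ++ ['M']).length : Int))])
    else if pvLyz.isPrefixOf (c :: rest) then
      pvGoA ((c :: rest).drop 5) (acc ++ ['K']) (pos ++ [("LYZ", ((acc ++ ['K']).length : Int))])
    else
      pvGoA rest (acc ++ [c]) pos
termination_by s _ _ => s.length
decreasing_by all_goals (simp [List.length_drop]; try omega)

def replace_and_track (input_seq : String) : String × (List (String × Int)) :=
  let r := pvGoA input_seq.toList [] []
  (String.mk r.1, r.2)

-- ===== PORT B =====
-- input_seq.find(tag, i) on the suffix from i: index of first occurrence of t, none if absent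
def pvFindIdx? (t : List Char) : List Char → Option Nat
  | [] => if t.isPrefixOf ([] : List Char) then some 0 else none
  | c :: r => if t.isPrefixOf (c :: r) then some 0 else (pvFindIdx? t r).map (· + 1)

-- B's "keep the strictly smaller find result" accumulator
def pvBetter (cur cand : Option (Nat × String × Char)) : Option (Nat × String × Char) :=
  match cand with
  | none => cur
  | some (j, n, r) =>
    match cur with
    | none => some (j, n, r)
    | some (k, n', r') => if j < k then some (j, n, r) else some (k, n', r')

-- B's inner for-loop over the three tags
def pvBestFind (s : List Char) : Option (Nat × String × Char) :=
  pvBetter (pvBetter (pvBetter none ((pvFindIdx? pvHyp s).map (fun k => (k, "HYP", 'P'))))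
      ((pvFindIdx? pvSme s).map (fun k => (k, "SME", 'M'))))
    ((pvFindIdx? pvLyz s).map (fun k => (k, "LYZ", 'K')))

-- B's outer while-True loop: copy the slice up to the best hit, substitute, jump past the tag
def pvGoB (s : List Char) (total : Int) : List Char × List (String × Int) :=
  match h : pvBestFind s with
  | none => (s, [])
  | some (k, n, r) =>
    let rest := pvGoB (s.drop (k + 5)) (total + (k : Int) + 1)
    (s.take k ++ r :: rest.1, (n, total + (k : Int) + 1) :: rest.2)
termination_by s.length
decreasing_by
  cases s with
  | nil => simp [show pvBestFind [] = none from by decide] at h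
  | cons c r => simp [List.length_drop]; try omega

def replace_and_track_alt (input_seq : String) : String × (List (String × Int)) :=
  let r := pvGoB input_seq.toList 0
  (String.mk r.1, r.2)

-- ===== PRECONDITION & SPEC =====
def Spec_replace_and_track (input_seq : String) (out : String × (List (String × Int))) : Prop := out = replace_and_track_alt input_seq
instance (input_seq : String) (out : String × (List (String × Int))) : Decidable (Spec_replace_and_track input_seq out) := by unfold Spec_replace_and_track; infer_instance

-- ===== CLAIM (what is proved, stated in full; the proofs are below) =====
def Claim_equal_replace_and_track : Prop := ∀ (input_seq : String), Dom_replace_and_track input_seq → Spec_replace_and_track input_seq (replace_and_track input_seq)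

-- ===== LEMMAS AND PROOFS =====

theorem pvGoB_none (s : List Char) (t : Int) (h : pvBestFind s = none) :
    pvGoB s t = (s, []) := by
  rw [pvGoB]
  split
  · rfl
  · next k n r heq => rw [h] at heq; cases heq

theorem pvGoB_some (s : List Char) (t : Int) (k : Nat) (n : String) (r : Char)
    (h : pvBestFind s = some (k, n, r)) :
    pvGoB s t = (s.take k ++ r :: (pvGoB (s.drop (k + 5)) (t + (k : Int) + 1)).1,
                 (n, t + (k : Int) + 1) :: (pvGoB (s.drop (k + 5)) (t + (k : Int) + 1)).2) := by
  rw [pvGoB]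
  split
  · next heq => rw [h] at heq; cases heq
  · next k' n' r' heq =>
    rw [h] at heq
    cases heq
    rfl

theorem pvBetter_none_left (o : Option (Nat × String × Char)) : pvBetter none o = o := by
  rcases o with _ | ⟨j, n, r⟩ <;> rfl

theorem pvBetter_zero (n : String) (r : Char) (o : Option (Nat × String × Char)) :
    pvBetter (some (0, n, r)) o = some (0, n, r) := by
  rcases o with _ | ⟨j, n', r'⟩ <;> simp [pvBetter]

theorem pvFindIdx?_of_prefix (t : List Char) (c : Char) (r : List Char)
    (h : t.isPrefixOf (c :: r) = true) : pvFindIdx? t (c :: r) = some 0 := by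
  simp [pvFindIdx?, h]

theorem pvFindIdx?_of_not_prefix (t : List Char) (c : Char) (r : List Char)
    (h : ¬ t.isPrefixOf (c :: r) = true) :
    pvFindIdx? t (c :: r) = (pvFindIdx? t r).map (· + 1) := by
  simp [pvFindIdx?, h]

theorem pvBetter_shifted_zero (o : Option Nat) (n₀ : String) (r₀ : Char) (n : String) (r : Char) :
    pvBetter ((o.map (· + 1)).map (fun k => (k, n₀, r₀))) (some (0, n, r)) = some (0, n, r) := by
  rcases o with _ | j <;> simp [pvBetter]

theorem pvBest_hyp (c : Char) (r : List Char) (h : pvHyp.isPrefixOf (c :: r) = true) :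
    pvBestFind (c :: r) = some (0, "HYP", 'P') := by
  simp only [pvBestFind, pvFindIdx?_of_prefix _ _ _ h, Option.map_some, pvBetter_none_left]
  rw [pvBetter_zero, pvBetter_zero]

theorem pvBest_sme (c : Char) (r : List Char)
    (h1 : ¬ pvHyp.isPrefixOf (c :: r) = true) (h2 : pvSme.isPrefixOf (c :: r) = true) :
    pvBestFind (c :: r) = some (0, "SME", 'M') := by
  simp only [pvBestFind, pvFindIdx?_of_prefix _ _ _ h2, pvFindIdx?_of_not_prefix _ _ _ h1,
    Option.map_some, pvBetter_none_left]
  rw [pvBetter_shifted_zero, pvBetter_zero]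

theorem pvBest_lyz (c : Char) (r : List Char)
    (h1 : ¬ pvHyp.isPrefixOf (c :: r) = true) (h2 : ¬ pvSme.isPrefixOf (c :: r) = true)
    (h3 : pvLyz.isPrefixOf (c :: r) = true) :
    pvBestFind (c :: r) = some (0, "LYZ", 'K') := by
  simp only [pvBestFind, pvFindIdx?_of_prefix _ _ _ h3,
    pvFindIdx?_of_not_prefix _ _ _ h1, pvFindIdx?_of_not_prefix _ _ _ h2,
    Option.map_some, pvBetter_none_left]
  rcases hh : pvFindIdx? pvHyp r with _ | j <;> rcases hs : pvFindIdx? pvSme r with _ | j' <;>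
    (simp [pvBetter]; try split_ifs <;> simp)

def pvShift (o : Option (Nat × String × Char)) : Option (Nat × String × Char) :=
  o.map (fun x => (x.1 + 1, x.2))

theorem pvBetter_shift (a b : Option (Nat × String × Char)) :
    pvBetter (pvShift a) (pvShift b) = pvShift (pvBetter a b) := by
  rcases a with _ | ⟨k, n', r'⟩ <;> rcases b with _ | ⟨j, n, r⟩ <;>
    simp [pvBetter, pvShift] <;> split_ifs with h h' <;> simp_all <;> omega

theorem pvBest_shift (c : Char) (r : List Char)
    (h1 : ¬ pvHyp.isPrefixOf (c :: r) = true) (h2 : ¬ pvSme.isPrefixOf (c :: r) = true)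
    (h3 : ¬ pvLyz.isPrefixOf (c :: r) = true) :
    pvBestFind (c :: r) = pvShift (pvBestFind r) := by
  have e : ∀ (t : List Char) (n : String) (rp : Char), ¬ t.isPrefixOf (c :: r) = true →
      (pvFindIdx? t (c :: r)).map (fun k => (k, n, rp)) =
        pvShift ((pvFindIdx? t r).map (fun k => (k, n, rp))) := by
    intro t n rp h
    rw [pvFindIdx?_of_not_prefix _ _ _ h]
    rcases pvFindIdx? t r with _ | j <;> simp [pvShift]
  simp only [pvBestFind, e _ _ _ h1, e _ _ _ h2, e _ _ _ h3]
  rw [show (none : Option (Nat × String × Char)) = pvShift none from rfl]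
  rw [pvBetter_shift, pvBetter_shift, pvBetter_shift]
  rfl

theorem pvGoB_shift (c : Char) (r : List Char) (t : Int)
    (h1 : ¬ pvHyp.isPrefixOf (c :: r) = true) (h2 : ¬ pvSme.isPrefixOf (c :: r) = true)
    (h3 : ¬ pvLyz.isPrefixOf (c :: r) = true) :
    pvGoB (c :: r) t = (c :: (pvGoB r (t + 1)).1, (pvGoB r (t + 1)).2) := by
  rcases hb : pvBestFind r with _ | ⟨k, n, rp⟩
  · have : pvBestFind (c :: r) = none := by rw [pvBest_shift _ _ h1 h2 h3, hb]; rfl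
    rw [pvGoB_none _ _ this, pvGoB_none _ _ hb]
  · have hcb : pvBestFind (c :: r) = some (k + 1, n, rp) := by
      rw [pvBest_shift _ _ h1 h2 h3, hb]; rfl
    have hd : (c :: r).drop (k + 1 + 5) = r.drop (k + 5) := by
      rw [show k + 1 + 5 = (k + 5) + 1 from by omega]; rfl
    rw [pvGoB_some _ _ _ _ _ hcb, pvGoB_some _ _ _ _ _ hb, hd]
    have ht : t + (((k + 1 : Nat) : Int)) + 1 = t + 1 + (k : Int) + 1 := by push_cast; ring
    rw [ht]
    simp [List.take_succ_cons]

theorem pvMain : ∀ (n : Nat) (s : List Char) (acc : List Char) (pos : List (String × Int)),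
    s.length ≤ n →
    pvGoA s acc pos = (acc ++ (pvGoB s (acc.length : Int)).1, pos ++ (pvGoB s (acc.length : Int)).2) := by
  intro n
  induction n with
  | zero =>
    intro s acc pos hle
    have : s = [] := by cases s <;> simp_all
    subst this
    rw [pvGoB_none _ _ (by decide)]
    simp [pvGoA]
  | succ m ih =>
    intro s acc pos hle
    cases s with
    | nil =>
      rw [pvGoB_none _ _ (by decide)]
      simp [pvGoA]
    | cons c r =>
      have hr : r.length ≤ m := by simpa using hle
      have hd5 : ((c :: r).drop 5).length ≤ m := by
        simp only [List.length_drop, List.length_cons]; omega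
      by_cases h1 : pvHyp.isPrefixOf (c :: r) = true
      · rw [show pvGoA (c :: r) acc pos = pvGoA ((c :: r).drop 5) (acc ++ ['P'])
            (pos ++ [("HYP", ((acc ++ ['P']).length : Int))]) from by rw [pvGoA]; simp [h1]]
        rw [ih _ _ _ hd5, pvGoB_some _ _ _ _ _ (pvBest_hyp _ _ h1)]
        simp [List.append_assoc]
      · by_cases h2 : pvSme.isPrefixOf (c :: r) = true
        · rw [show pvGoA (c :: r) acc pos = pvGoA ((c :: r).drop 5) (acc ++ ['M'])
              (pos ++ [("SME", ((acc ++ ['M']).length : Int))]) from by rw [pvGoA]; simp [h1, h2]]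
          rw [ih _ _ _ hd5, pvGoB_some _ _ _ _ _ (pvBest_sme _ _ h1 h2)]
          simp [List.append_assoc]
        · by_cases h3 : pvLyz.isPrefixOf (c :: r) = true
          · rw [show pvGoA (c :: r) acc pos = pvGoA ((c :: r).drop 5) (acc ++ ['K'])
                (pos ++ [("LYZ", ((acc ++ ['K']).length : Int))]) from by rw [pvGoA]; simp [h1, h2, h3]]
            rw [ih _ _ _ hd5, pvGoB_some _ _ _ _ _ (pvBest_lyz _ _ h1 h2 h3)]
            simp [List.append_assoc]
          · rw [show pvGoA (c :: r) acc pos = pvGoA r (acc ++ [c]) pos from by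
                rw [pvGoA]; simp [h1, h2, h3]]
            rw [ih _ _ _ hr, pvGoB_shift _ _ _ h1 h2 h3]
            simp [List.append_assoc]

-- ===== VERDICT (by name: the statement is the Claim_ definition above) =====
theorem replace_and_track_spec : Claim_equal_replace_and_track := by
  intro s _
  unfold Spec_replace_and_track replace_and_track replace_and_track_alt
  rw [pvMain s.toList.length s.toList [] [] (le_refl _)]
  simp
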